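-- pv_equiv track=rewrite | github.com/MuhammadHaaris278/EHR---Context-Aware-Suggestions | app/llm_pipeline.py | _extract_mistral_workup
-- ===== SOURCE A (Python) =====
-- from typing import Dict, List, Optional, Any, Tuple
--
-- def _extract_mistral_workup(content: List[str]) -> List[str]:
--     """Extract recommended workup from Mistral AI with better parsing."""
--     workup_items = []
--     current_item = ""
--
--     for line in content:
--         if not line:
--             continue
--
--         # Check if this starts a new workup item
--         if (line.startswith(('-', '•', '*')) or
--             any(char.isdigit() and char in line[:5] for char in "12345") or
--             line.endswith(':') or
--             any(keyword in line.lower() for keyword in ["laboratory", "imaging", "test", "study", "exam"])):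
--
--             # Save previous item
--             if current_item and len(current_item) > 15:
--                 workup_items.append(current_item.strip())
--
--             # Start new item
--             current_item = line.lstrip('- • * 1234567890. ')
--         else:
--             # Continue current item
--             if current_item:
--                 current_item += " " + line
--             else:
--                 current_item = line
--
--     # Add the last item
--     if current_item and len(current_item) > 15:
--         workup_items.append(current_item.strip())
--
--     return workup_items[:8]  # Limit to 8 items
-- ===== SOURCE B (Python) =====
-- from typing import List
--
-- _KEYWORDS = ["laboratory", "imaging", "test", "study", "exam"]
--
-- def _is_header(line: str) -> bool:
--     return (line.startswith(('-', '•', '*')) or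
--             any(c in line[:5] for c in "12345") or
--             line.endswith(':') or
--             any(k in line.lower() for k in _KEYWORDS))
--
-- def _extract_mistral_workup(content: List[str]) -> List[str]:
--     """Two-phase: split the non-empty lines into groups, one per header line (a leading
--     run of non-header lines forms its own group, kept raw), then render each group by
--     joining its lines with spaces and keep the long ones."""
--     lines = [l for l in content if l]
--     items = []
--     while lines:
--         head, rest = lines[0], lines[1:]
--         first = head.lstrip('- • * 1234567890. ') if _is_header(head) else head
--         j = 0
--         while j < len(rest) and not _is_header(rest[j]):
--             j += 1
--         item = " ".join(([first] if first else []) + rest[:j])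
--         if len(item) > 15:
--             items.append(item.strip())
--         lines = rest[j:]
--     return items[:8]
-- ===== Notes on version B (the rewrite author's own statement) =====
-- stated objective: alternative
-- what changed: Replaces A's single interleaved accumulator loop (a current_item string grown line by line and flushed whenever a header appears) with a two-phase decomposition: an outer loop that splits the non-empty lines into one group per header line (inner scan finds the group's extent), then each group is rendered with a single ' '.join and length-filtered.
import Mathlib
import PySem

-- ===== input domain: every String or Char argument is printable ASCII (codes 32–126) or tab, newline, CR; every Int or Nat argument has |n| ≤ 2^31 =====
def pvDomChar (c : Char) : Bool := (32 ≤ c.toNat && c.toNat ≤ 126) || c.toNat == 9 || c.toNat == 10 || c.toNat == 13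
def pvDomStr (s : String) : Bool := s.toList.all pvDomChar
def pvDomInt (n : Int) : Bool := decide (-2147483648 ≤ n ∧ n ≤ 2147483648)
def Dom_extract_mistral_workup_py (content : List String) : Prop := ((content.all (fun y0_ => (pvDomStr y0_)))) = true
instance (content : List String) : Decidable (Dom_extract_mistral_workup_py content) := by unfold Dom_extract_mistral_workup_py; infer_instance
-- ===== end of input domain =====

-- B replaces A's interleaved accumulator loop by a grouping pass (split the non-empty lines at
-- header lines) followed by a per-group join/filter; same complexity, alternative decomposition.


-- ===== PORT A =====
-- str.lstrip(chars): drop leading characters that occur in `chars` (exact; PySem has no lstrip-with-chars)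
def pyLstripChars (cs : List Char) (chars : List Char) : List Char :=
  cs.dropWhile (fun c => chars.contains c)

def pvStripSet : List Char := "- • * 1234567890. ".toList

def pvKeywords : List (List Char) :=
  ["laboratory".toList, "imaging".toList, "test".toList, "study".toList, "exam".toList]

-- A's header condition, transliterated: startswith on a tuple is a disjunction;
-- `char in line[:5]` is a substring test on the slice; keywords tested in line.lower()
def isHeaderA (l : List Char) : Bool :=
  PySem.Chars.startswith l "-".toList || PySem.Chars.startswith l "•".toList ||
    PySem.Chars.startswith l "*".toList ||
  "12345".toList.any (fun c =>
    PySem.Chars.isdigit c && PySem.Chars.isIn [c] (PySem.Chars.slice l none (some 5))) ||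
  PySem.Chars.endswith l ":".toList ||
  pvKeywords.any (fun k => PySem.Chars.isIn k (PySem.Chars.lower l))

-- "Save previous item" (also the final "Add the last item")
def finA (st : List (List Char) × List Char) : List (List Char) :=
  if st.2 ≠ [] ∧ 15 < st.2.length then st.1 ++ [PySem.Chars.strip st.2] else st.1

-- the body of A's for-loop, on the state (workup_items, current_item)
def stepAL (st : List (List Char) × List Char) (l : List Char) : List (List Char) × List Char :=
  if l = [] then st
  else if isHeaderA l then (finA st, pyLstripChars l pvStripSet)
  else if st.2 ≠ [] then (st.1, st.2 ++ ' ' :: l) else (st.1, l)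

def extract_mistral_workup_py (content : List String) : List String :=
  (PySem.List.slice (finA ((content.map String.toList).foldl stepAL ([], [])))
    none (some 8)).map String.ofList

-- ===== PORT B =====
def isHeaderB (l : List Char) : Bool :=
  PySem.Chars.startswith l "-".toList || PySem.Chars.startswith l "•".toList ||
    PySem.Chars.startswith l "*".toList ||
  "12345".toList.any (fun c => PySem.Chars.isIn [c] (PySem.Chars.slice l none (some 5))) ||
  PySem.Chars.endswith l ":".toList ||
  pvKeywords.any (fun k => PySem.Chars.isIn k (PySem.Chars.lower l))

-- B's outer while-loop over the remaining lines, accumulating `items`; the inner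
-- `while j < ... and not _is_header(rest[j])` scan computes rest[:j] / rest[j:],
-- i.e. takeWhile / dropWhile on the non-header predicate
def parseBAcc (items : List (List Char)) : List (List Char) → List (List Char)
  | [] => items
  | l :: rest =>
    let first := if isHeaderB l then pyLstripChars l pvStripSet else l
    let body := rest.takeWhile (fun x => !isHeaderB x)
    let item := PySem.Chars.join " ".toList (if first = [] then body else first :: body)
    parseBAcc (items ++ (if 15 < item.length then [PySem.Chars.strip item] else []))
      (rest.dropWhile (fun x => !isHeaderB x))
termination_by ls => ls.length
decreasing_by
  simpa using Nat.lt_succ_of_le (List.length_dropWhile_le _ _)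

def extract_mistral_workup_py_alt (content : List String) : List String :=
  (PySem.List.slice (parseBAcc [] ((content.map String.toList).filter (fun l => l ≠ [])))
    none (some 8)).map String.ofList

-- ===== PRECONDITION & SPEC =====
def Spec_extract_mistral_workup_py (content : List String) (out : List String) : Prop := out = extract_mistral_workup_py_alt content
instance (content : List String) (out : List String) : Decidable (Spec_extract_mistral_workup_py content out) := by unfold Spec_extract_mistral_workup_py; infer_instance

-- ===== CLAIM (what is proved, stated in full; the proofs are below) =====
def Claim_equal_extract_mistral_workup_py : Prop := ∀ (content : List String), Dom_extract_mistral_workup_py content → Spec_extract_mistral_workup_py content (extract_mistral_workup_py content)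

-- ===== LEMMAS AND PROOFS =====

-- the group-recursive form of B's loop (proof helper)
def pvParse : List (List Char) → List (List Char)
  | [] => []
  | l :: rest =>
    let first := if isHeaderB l then pyLstripChars l pvStripSet else l
    let body := rest.takeWhile (fun x => !isHeaderB x)
    let item := PySem.Chars.join " ".toList (if first = [] then body else first :: body)
    (if 15 < item.length then [PySem.Chars.strip item] else []) ++
      pvParse (rest.dropWhile (fun x => !isHeaderB x))
termination_by ls => ls.length
decreasing_by
  simpa using Nat.lt_succ_of_le (List.length_dropWhile_le _ _)

-- the accumulator loop computes the group-recursive form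
theorem parseBAcc_eq (n : Nat) : ∀ ls : List (List Char), ls.length ≤ n → ∀ items,
    parseBAcc items ls = items ++ pvParse ls := by
  induction n with
  | zero =>
    intro ls hlen items
    have : ls = [] := List.eq_nil_of_length_eq_zero (Nat.le_zero.mp hlen)
    subst this; simp [parseBAcc, pvParse]
  | succ n ih =>
    intro ls hlen items
    cases ls with
    | nil => simp [parseBAcc, pvParse]
    | cons l rest =>
      have hlen' : (rest.dropWhile (fun x => !isHeaderB x)).length ≤ n := by
        have h1 := List.length_dropWhile_le (fun x => !isHeaderB x) rest
        have h2 : rest.length ≤ n := by simpa using Nat.le_of_succ_le_succ hlen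
        omega
      rw [parseBAcc, ih _ hlen']
      conv_rhs => rw [pvParse]
      simp [List.append_assoc]

-- the two header tests agree: every character of "12345" satisfies isdigit
theorem header_eq (l : List Char) : isHeaderA l = isHeaderB l := by
  have h5 : "12345".toList = ['1', '2', '3', '4', '5'] := by decide
  simp [isHeaderA, isHeaderB, h5, PySem.Chars.isdigit]

-- flush of the pending item, as A performs it / as B's per-group filter performs it
def emitP (cur : List Char) : List (List Char) :=
  if 15 < cur.length then [PySem.Chars.strip cur] else []

-- extension of the pending item by one continuation line, as in A's else branch
def extP (cur : List Char) (l : List Char) : List Char :=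
  if cur ≠ [] then cur ++ ' ' :: l else l

-- A's remaining output, given the pending item and the remaining (non-empty) lines
def runA : List Char → List (List Char) → List (List Char)
  | cur, [] => emitP cur
  | cur, l :: ls =>
    if isHeaderB l then emitP cur ++ runA (pyLstripChars l pvStripSet) ls
    else runA (extP cur l) ls

-- what runA does after the first header of the remaining lines
def contin : List (List Char) → List (List Char)
  | [] => []
  | h :: tl => runA (pyLstripChars h pvStripSet) tl

theorem flush_eq (xs : List (List Char)) (cur : List Char) :
    finA (xs, cur) = xs ++ emitP cur := by
  unfold finA emitP
  by_cases h : 15 < cur.length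
  · have hne : cur ≠ [] := by intro hc; rw [hc] at h; simp at h
    simp [h, hne]
  · simp [h]

-- empty lines do not move A's state, so the fold passes to the filtered list
theorem foldl_filter_stepAL (ls : List (List Char)) (st : List (List Char) × List Char) :
    ls.foldl stepAL st = (ls.filter (fun l => l ≠ [])).foldl stepAL st := by
  induction ls generalizing st with
  | nil => rfl
  | cons l ls ih =>
    by_cases h : l = []
    · subst h; simp [stepAL, ih]
    · rw [List.filter_cons_of_pos (by simpa using h), List.foldl_cons, List.foldl_cons, ih]

-- A's fold, finished by the final flush, equals items ++ runA cur ls (on non-empty lines)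
theorem lemA (ls : List (List Char)) (hne : ∀ l ∈ ls, l ≠ []) (items : List (List Char))
    (cur : List Char) :
    finA (ls.foldl stepAL (items, cur)) = items ++ runA cur ls := by
  induction ls generalizing items cur with
  | nil => simpa [runA] using flush_eq items cur
  | cons l ls ih =>
    have hl : l ≠ [] := hne l (by simp)
    have hne' : ∀ x ∈ ls, x ≠ [] := fun x hx => hne x (by simp [hx])
    by_cases hh : isHeaderB l
    · have hA : isHeaderA l = true := by rw [header_eq]; exact hh
      rw [List.foldl_cons, show stepAL (items, cur) l = (finA (items, cur), pyLstripChars l pvStripSet) by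
            simp [stepAL, hl, hA],
          flush_eq items cur, ih hne', runA, if_pos hh, List.append_assoc]
    · have hA : isHeaderA l = false := by rw [header_eq]; exact Bool.eq_false_iff.mpr hh
      rw [List.foldl_cons, show stepAL (items, cur) l = (items, extP cur l) by
            simp [stepAL, hl, hA, extP]; split_ifs <;> simp_all,
          ih hne', runA, if_neg (by simp [hh])]

-- runA splits at the first header among the remaining lines
theorem lemSpan (ls : List (List Char)) (cur : List Char) :
    runA cur ls =
      emitP ((ls.takeWhile (fun x => !isHeaderB x)).foldl extP cur) ++
        contin (ls.dropWhile (fun x => !isHeaderB x)) := by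
  induction ls generalizing cur with
  | nil => simp [runA, contin]
  | cons l ls ih =>
    by_cases hh : isHeaderB l
    · rw [runA, if_pos hh, List.takeWhile_cons, List.dropWhile_cons]
      simp [hh, contin]
    · rw [runA, if_neg (by simp [hh]), List.takeWhile_cons, List.dropWhile_cons]
      simp only [hh, Bool.not_false, if_pos, List.foldl_cons]
      rw [ih]

theorem join_shift (c b : List Char) (bs : List (List Char)) :
    PySem.Chars.join [' '] (c :: b :: bs) = PySem.Chars.join [' '] ((c ++ ' ' :: b) :: bs) := by
  cases bs with
  | nil => simp [PySem.Chars.join_cons_cons, PySem.Chars.join_singleton]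
  | cons x xs =>
      rw [PySem.Chars.join_cons_cons, PySem.Chars.join_cons_cons, PySem.Chars.join_cons_cons]
      simp

-- building the pending item by repeated extension = joining the group with spaces
theorem lemJoin (bs : List (List Char)) (hne : ∀ b ∈ bs, b ≠ []) (c : List Char) (hc : c ≠ []) :
    bs.foldl extP c = PySem.Chars.join " ".toList (c :: bs) := by
  induction bs generalizing c with
  | nil => simp [PySem.Chars.join_singleton]
  | cons b bs ih =>
    have hb : b ≠ [] := hne b (by simp)
    have hne' : ∀ x ∈ bs, x ≠ [] := fun x hx => hne x (by simp [hx])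
    have hcb : c ++ ' ' :: b ≠ [] := by simp
    rw [List.foldl_cons, show extP c b = c ++ ' ' :: b by simp [extP, hc], ih hne' _ hcb,
        show " ".toList = [' '] from rfl, join_shift]

theorem lemJoin0 (bs : List (List Char)) (hne : ∀ b ∈ bs, b ≠ []) :
    bs.foldl extP [] = PySem.Chars.join " ".toList bs := by
  cases bs with
  | nil => simp [PySem.Chars.join_nil]
  | cons b bs =>
    have hb : b ≠ [] := hne b (by simp)
    rw [List.foldl_cons, show extP [] b = b by simp [extP],
        lemJoin bs (fun x hx => hne x (by simp [hx])) b hb]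

theorem dropWhile_head_false {α : Type} (p : α → Bool) (ls : List α) :
    ∀ (h : α) (tl : List α), ls.dropWhile p = h :: tl → p h = false := by
  induction ls with
  | nil => intro h tl e; simp at e
  | cons a as ih =>
    intro h tl e
    rw [List.dropWhile_cons] at e
    by_cases hp : p a
    · rw [if_pos hp] at e; exact ih h tl e
    · rw [if_neg hp] at e; injection e with e1 _; subst e1; simpa using hp

-- B's grouping pass computes runA on non-empty lines
theorem lemParse (n : Nat) : ∀ ls : List (List Char), ls.length ≤ n → (∀ l ∈ ls, l ≠ []) →
    runA [] ls = pvParse ls := by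
  induction n with
  | zero =>
    intro ls hlen _
    have : ls = [] := List.eq_nil_of_length_eq_zero (Nat.le_zero.mp hlen)
    subst this; simp [runA, pvParse, emitP]
  | succ n ih =>
    intro ls hlen hne
    cases ls with
    | nil => simp [runA, pvParse, emitP]
    | cons l rest =>
      have hl : l ≠ [] := hne l (by simp)
      have hner : ∀ x ∈ rest, x ≠ [] := fun x hx => hne x (by simp [hx])
      -- step 1: skip the head
      have step1 : runA [] (l :: rest) =
          runA (if isHeaderB l then pyLstripChars l pvStripSet else l) rest := by
        by_cases hh : isHeaderB l
        · simp [runA, hh, emitP]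
        · simp [runA, hh, extP]
      set first := if isHeaderB l then pyLstripChars l pvStripSet else l with hfirst
      set body := rest.takeWhile (fun x => !isHeaderB x) with hbody
      set tail := rest.dropWhile (fun x => !isHeaderB x) with htail
      have hbodyne : ∀ b ∈ body, b ≠ [] := fun b hb =>
        hner b ((List.takeWhile_sublist _).mem hb)
      have htailne : ∀ x ∈ tail, x ≠ [] := fun x hx =>
        hner x ((List.dropWhile_sublist _).mem hx)
      -- step 3: the pending item after the group = the join
      have step3 : body.foldl extP first =
          PySem.Chars.join " ".toList (if first = [] then body else first :: body) := by
        by_cases hf : first = []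
        · rw [if_pos hf, hf]; exact lemJoin0 body hbodyne
        · rw [if_neg hf]; exact lemJoin body hbodyne first hf
      -- step 5: the continuation equals parseB of the tail
      have step5 : contin tail = pvParse tail := by
        cases e : tail with
        | nil => simp [contin, pvParse]
        | cons h tl =>
          have hh : isHeaderB h = true := by
            have := dropWhile_head_false _ rest h tl (htail ▸ e)
            simpa using this
          have hlen' : (h :: tl).length ≤ n := by
            have h1 : tail.length ≤ rest.length := List.length_dropWhile_le _ _
            have h2 : rest.length ≤ n := by simpa using Nat.le_of_succ_le_succ hlen
            rw [e] at h1; omega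
          have hxne : ∀ x ∈ h :: tl, x ≠ [] := by rw [← e]; exact htailne
          rw [contin, ← ih (h :: tl) hlen' hxne, runA, if_pos hh]
          simp [emitP]
      rw [step1, lemSpan, ← hbody, ← htail, step3, step5]
      conv_rhs => rw [pvParse]
      simp only [← hfirst, ← hbody, ← htail, emitP]

-- ===== VERDICT (by name: the statement is the Claim_ definition above) =====
theorem extract_mistral_workup_py_spec : Claim_equal_extract_mistral_workup_py := by
  intro content _
  unfold Spec_extract_mistral_workup_py extract_mistral_workup_py extract_mistral_workup_py_alt
  congr 2
  rw [foldl_filter_stepAL]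
  set lines := (content.map String.toList).filter (fun l => l ≠ []) with hlines
  have hne : ∀ l ∈ lines, l ≠ [] := by
    intro l hl
    rw [hlines, List.mem_filter] at hl
    simpa using hl.2
  rw [parseBAcc_eq lines.length lines le_rfl []]
  calc finA (lines.foldl stepAL ([], []))
      = [] ++ runA [] lines := lemA lines hne [] []
    _ = [] ++ pvParse lines := by
        rw [lemParse lines.length lines le_rfl hne]
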